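-- pv_equiv track=rewrite | github.com/shreeyakumbhoje17/lms_fandb | backend/users/graph.py | suggest_role_from_skus
-- ===== SOURCE A (Python) =====
-- def suggest_role_from_skus(sku_parts: list[str]) -> tuple[str | None, str]:
--     """
--     Returns (role, reason)
--     role ∈ {"field", "office", None}
--     """
--     parts = [p.upper() for p in sku_parts]
--
--     if any("F3" in p for p in parts):
--         return "field", f"Detected F3-like SKU(s): {', '.join(sku_parts)}"
--
--     if any("E3" in p for p in parts) or any("ENTERPRISEPACK" in p for p in parts):
--         return "office", f"Detected E3-like SKU(s): {', '.join(sku_parts)}"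
--
--     if sku_parts:
--         return None, f"SKU(s) found but not mapped: {', '.join(sku_parts)}"
--
--     return None, "No assigned licenses found"
-- ===== SOURCE B (Python) =====
-- def _rank(p: str) -> int:
--     u = p.upper()
--     if "F3" in u:
--         return 0
--     if "E3" in u or "ENTERPRISEPACK" in u:
--         return 1
--     return 2
--
-- _TABLE = [("field", "Detected F3-like SKU(s): "),
--           ("office", "Detected E3-like SKU(s): "),
--           (None, "SKU(s) found but not mapped: ")]
--
-- def suggest_role_from_skus(sku_parts: list[str]) -> tuple[str | None, str]:
--     """
--     Returns (role, reason)
--     role ∈ {"field", "office", None}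
--     """
--     best = min(map(_rank, sku_parts), default=3)
--     if best == 3:
--         return None, "No assigned licenses found"
--     role, prefix = _TABLE[best]
--     return role, prefix + ", ".join(sku_parts)
-- ===== Notes on version B (the rewrite author's own statement) =====
-- stated objective: alternative
-- what changed: Instead of three whole-list any() scans in priority order, B classifies each SKU independently into a numeric rank (0=F3, 1=E3-like, 2=unmapped), reduces the ranks with min (default 3 for the empty list), and dispatches the result through a lookup table.
import Mathlib
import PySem

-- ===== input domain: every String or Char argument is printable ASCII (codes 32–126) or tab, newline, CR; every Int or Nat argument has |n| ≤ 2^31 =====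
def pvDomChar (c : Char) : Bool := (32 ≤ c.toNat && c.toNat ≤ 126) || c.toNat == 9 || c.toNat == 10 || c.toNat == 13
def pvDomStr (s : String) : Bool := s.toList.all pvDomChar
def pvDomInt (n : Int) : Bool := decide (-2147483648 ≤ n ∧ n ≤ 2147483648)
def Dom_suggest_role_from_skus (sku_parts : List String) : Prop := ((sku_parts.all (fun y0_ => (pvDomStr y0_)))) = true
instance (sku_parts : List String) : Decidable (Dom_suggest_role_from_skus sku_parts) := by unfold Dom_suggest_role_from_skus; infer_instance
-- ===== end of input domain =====

-- B classifies each SKU independently into a numeric rank, reduces ranks with min, and dispatches via a lookup table (same cost; alternative decomposition).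
-- ===== PORT A =====
def suggest_role_from_skus (sku_parts : List String) : Option String × String :=
  let parts := sku_parts.map PySem.Str.upper
  if parts.any (fun p => PySem.Str.isIn "F3" p) then
    (some "field", "Detected F3-like SKU(s): " ++ PySem.Str.join ", " sku_parts)
  else if parts.any (fun p => PySem.Str.isIn "E3" p) || parts.any (fun p => PySem.Str.isIn "ENTERPRISEPACK" p) then
    (some "office", "Detected E3-like SKU(s): " ++ PySem.Str.join ", " sku_parts)
  else if sku_parts ≠ [] then
    (none, "SKU(s) found but not mapped: " ++ PySem.Str.join ", " sku_parts)
  else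
    (none, "No assigned licenses found")

-- ===== PORT B =====
def pvRank (p : String) : Nat :=
  let u := PySem.Str.upper p
  if PySem.Str.isIn "F3" u then 0
  else if PySem.Str.isIn "E3" u || PySem.Str.isIn "ENTERPRISEPACK" u then 1
  else 2

def pvTable : List (Option String × String) :=
  [(some "field", "Detected F3-like SKU(s): "),
   (some "office", "Detected E3-like SKU(s): "),
   (none, "SKU(s) found but not mapped: ")]

def suggest_role_from_skus_alt (sku_parts : List String) : Option String × String :=
  let best := (sku_parts.map pvRank).foldl min 3
  if best = 3 then (none, "No assigned licenses found")
  else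
    let rp := pvTable.getD best (none, "")
    (rp.1, rp.2 ++ PySem.Str.join ", " sku_parts)

-- ===== PRECONDITION & SPEC =====
def Spec_suggest_role_from_skus (sku_parts : List String) (out : Option String × String) : Prop := out = suggest_role_from_skus_alt sku_parts
instance (sku_parts : List String) (out : Option String × String) : Decidable (Spec_suggest_role_from_skus sku_parts out) := by unfold Spec_suggest_role_from_skus; infer_instance

-- ===== CLAIM (what is proved, stated in full; the proofs are below) =====
def Claim_equal_suggest_role_from_skus : Prop := ∀ (sku_parts : List String), Dom_suggest_role_from_skus sku_parts → Spec_suggest_role_from_skus sku_parts (suggest_role_from_skus sku_parts)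

-- ===== LEMMAS AND PROOFS =====

lemma any_or_split {α : Type} (l : List α) (f g : α → Bool) :
    (l.any f || l.any g) = l.any (fun x => f x || g x) := by
  induction l with
  | nil => simp
  | cons x xs ih => simp [← ih, Bool.or_assoc, Bool.or_left_comm]

lemma min_fold (f g : String → Bool) (l : List String) (m : Nat) (hm : m ≤ 3) :
    (l.map (fun p => if f p then 0 else if g p then 1 else 2)).foldl min m =
      min m (if l.any f then 0 else if l.any g then 1 else if l.isEmpty then 3 else 2) := by
  induction l generalizing m with
  | nil => simpa using (Nat.min_eq_left hm).symm
  | cons x xs ih =>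
    simp only [List.map_cons, List.foldl_cons, List.any_cons, List.isEmpty_cons]
    rw [ih (min m (if f x then 0 else if g x then 1 else 2)) (by split_ifs <;> omega)]
    cases hfx : f x <;> cases hgx : g x <;> cases haf : xs.any f <;> cases hag : xs.any g <;>
      cases he : xs.isEmpty <;> simp_all

lemma rank_eq :
    pvRank = (fun p => if PySem.Str.isIn "F3" (PySem.Str.upper p) then 0
                else if (PySem.Str.isIn "E3" (PySem.Str.upper p)
                        || PySem.Str.isIn "ENTERPRISEPACK" (PySem.Str.upper p)) then 1 else 2) := rfl

-- ===== VERDICT (by name: the statement is the Claim_ definition above) =====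
theorem suggest_role_from_skus_spec : Claim_equal_suggest_role_from_skus := by
  intro sku_parts _
  unfold Spec_suggest_role_from_skus suggest_role_from_skus suggest_role_from_skus_alt
  simp only [List.any_map, Function.comp_def]
  rw [rank_eq, min_fold (fun p => PySem.Str.isIn "F3" (PySem.Str.upper p))
      (fun p => PySem.Str.isIn "E3" (PySem.Str.upper p)
        || PySem.Str.isIn "ENTERPRISEPACK" (PySem.Str.upper p)) sku_parts 3 (le_refl 3),
      any_or_split]
  cases hf : sku_parts.any (fun p => PySem.Str.isIn "F3" (PySem.Str.upper p)) with
  | true => simp [hf, pvTable]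
  | false =>
    cases he : sku_parts.any (fun p => PySem.Str.isIn "E3" (PySem.Str.upper p)
        || PySem.Str.isIn "ENTERPRISEPACK" (PySem.Str.upper p)) with
    | true => simp [hf, he, pvTable]
    | false =>
      cases sku_parts with
      | nil => simp
      | cons a t => simp [hf, he, pvTable]
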